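-- pv_equiv track=rewrite | github.com/MaramAbidi/Openclaw-Agents | workspace-preparation/skills/create-pptx/scripts/create_from_template.py | chunk_slide_specs
-- ===== SOURCE A (Python) =====
-- from typing import List, Sequence, Tuple
--
-- SlideSpec = Tuple[str, List[str]]
--
-- def chunk_slide_specs(
--     slides: Sequence[SlideSpec],
--     max_bullets_per_slide: int,
--     max_slides: int,
-- ) -> List[SlideSpec]:
--     out: List[SlideSpec] = []
--
--     for title, bullets in slides:
--         if len(out) >= max_slides:
--             break
--
--         if not bullets:
--             out.append((title, []))
--             continue
--
--         step = max(1, max_bullets_per_slide)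
--         for i in range(0, len(bullets), step):
--             if len(out) >= max_slides:
--                 break
--             chunk = bullets[i : i + step]
--             chunk_title = title if i == 0 else f"{title} (cont.)"
--             out.append((chunk_title, chunk))
--
--     return out
-- ===== SOURCE B (Python) =====
-- from typing import List, Sequence, Tuple
--
-- SlideSpec = Tuple[str, List[str]]
--
--
-- def _slide_chunks(title: str, bullets: Sequence[str], step: int) -> List[SlideSpec]:
--     """Stream bullets into an accumulator, flushing a chunk each time it fills."""
--     if not bullets:
--         return [(title, [])]
--     specs: List[SlideSpec] = []
--     cur: List[str] = []
--     for b in bullets: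
--         cur.append(b)
--         if len(cur) == step:
--             specs.append((title if not specs else f"{title} (cont.)", cur))
--             cur = []
--     if cur:
--         specs.append((title if not specs else f"{title} (cont.)", cur))
--     return specs
--
--
-- def chunk_slide_specs(
--     slides: Sequence[SlideSpec],
--     max_bullets_per_slide: int,
--     max_slides: int,
-- ) -> List[SlideSpec]:
--     step = max(1, max_bullets_per_slide)
--     budget = max(0, max_slides)
--     out: List[SlideSpec] = []
--     for title, bullets in slides:
--         if budget == 0:
--             break
--         specs = _slide_chunks(title, bullets, step)[:budget]
--         out.extend(specs)
--         budget -= len(specs)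
--     return out
-- ===== Notes on version B (the rewrite author's own statement) =====
-- stated objective: alternative
-- what changed: A slices each bullet list by computed index ranges (range(0,len,step) with bullets[i:i+step]) and checks the output length against max_slides before every append; B never indexes or slices: it streams bullets one at a time into a current-chunk accumulator that is flushed when it reaches step bullets, and the outer loop keeps a decrementing remaining-slide budget, truncating each slide's chunk list against it.
import Mathlib
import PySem

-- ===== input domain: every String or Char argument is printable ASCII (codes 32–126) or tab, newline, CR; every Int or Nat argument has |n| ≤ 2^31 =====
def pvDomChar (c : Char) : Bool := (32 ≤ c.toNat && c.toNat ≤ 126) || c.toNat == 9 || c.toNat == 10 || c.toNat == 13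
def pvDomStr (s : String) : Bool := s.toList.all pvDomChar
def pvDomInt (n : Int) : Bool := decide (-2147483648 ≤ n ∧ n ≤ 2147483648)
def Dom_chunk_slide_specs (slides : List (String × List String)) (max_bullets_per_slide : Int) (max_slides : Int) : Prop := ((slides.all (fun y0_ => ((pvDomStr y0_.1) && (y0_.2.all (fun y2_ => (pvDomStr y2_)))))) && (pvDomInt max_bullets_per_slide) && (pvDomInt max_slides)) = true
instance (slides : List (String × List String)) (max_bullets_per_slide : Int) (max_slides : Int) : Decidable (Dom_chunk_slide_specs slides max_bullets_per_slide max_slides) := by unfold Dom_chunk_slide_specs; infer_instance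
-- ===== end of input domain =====

-- B replaces A's index-range slicing with a per-bullet streaming chunker (accumulate, flush when
-- full) and A's output-length cap check with a decrementing remaining-slide budget. Objective: alternative.

-- ===== PORT A =====
-- inner 'for i in range(0, len(bullets), step)' loop with its break
def pvInnerA (ms : Int) (title : String) (bullets : List String) (step : Int) :
    List Int → List (String × List String) → List (String × List String)
  | [], out => out
  | i :: rest, out =>
    if (out.length : Int) ≥ ms then out
    else
      pvInnerA ms title bullets step rest
        (out ++ [((if i = 0 then title else title ++ " (cont.)"),
                  PySem.List.slice bullets (some i) (some (i + step)))])

-- outer 'for title, bullets in slides' loop with its break/continue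
def pvOuterA (ms mb : Int) :
    List (String × List String) → List (String × List String) → List (String × List String)
  | [], out => out
  | (title, bullets) :: rest, out =>
    if (out.length : Int) ≥ ms then out
    else if bullets = [] then pvOuterA ms mb rest (out ++ [(title, [])])
    else
      pvOuterA ms mb rest
        (pvInnerA ms title bullets (max 1 mb)
          (PySem.List.pyRange 0 (bullets.length : Int) (max 1 mb)) out)

def chunk_slide_specs (slides : List (String × List String)) (max_bullets_per_slide : Int) (max_slides : Int) : List (String × List String) :=
  pvOuterA max_slides max_bullets_per_slide slides []

-- ===== PORT B =====
-- 'title if not specs else f"{title} (cont.)"'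
def pvT (title : String) (specs : List (String × List String)) : String :=
  if specs = [] then title else title ++ " (cont.)"

-- B's per-bullet loop in _slide_chunks: cur.append(b); flush when len(cur) == step; final flush
def pvStream (title : String) (step : Int) :
    List String → List (String × List String) → List String → List (String × List String)
  | [], specs, cur => if cur = [] then specs else specs ++ [(pvT title specs, cur)]
  | b :: rest, specs, cur =>
    if ((cur ++ [b]).length : Int) = step then
      pvStream title step rest (specs ++ [(pvT title specs, cur ++ [b])]) []
    else
      pvStream title step rest specs (cur ++ [b])

-- _slide_chunks
def pvSlideChunks (title : String) (bullets : List String) (step : Int) :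
    List (String × List String) :=
  if bullets = [] then [(title, [])] else pvStream title step bullets [] []

-- B's outer loop: break when budget == 0, take specs[:budget], decrement budget
def pvOuterB (step : Int) :
    List (String × List String) → Int → List (String × List String)
  | [], _ => []
  | (title, bullets) :: rest, budget =>
    if budget = 0 then []
    else
      let specs := PySem.List.slice (pvSlideChunks title bullets step) none (some budget)
      specs ++ pvOuterB step rest (budget - specs.length)

def chunk_slide_specs_alt (slides : List (String × List String)) (max_bullets_per_slide : Int) (max_slides : Int) : List (String × List String) :=
  pvOuterB (max 1 max_bullets_per_slide) slides (max 0 max_slides)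

-- ===== PRECONDITION & SPEC =====
def Spec_chunk_slide_specs (slides : List (String × List String)) (max_bullets_per_slide : Int) (max_slides : Int) (out : List (String × List String)) : Prop := out = chunk_slide_specs_alt slides max_bullets_per_slide max_slides
instance (slides : List (String × List String)) (max_bullets_per_slide : Int) (max_slides : Int) (out : List (String × List String)) : Decidable (Spec_chunk_slide_specs slides max_bullets_per_slide max_slides out) := by unfold Spec_chunk_slide_specs; infer_instance

-- ===== CLAIM =====
def Claim_equal_chunk_slide_specs : Prop := ∀ (slides : List (String × List String)) (max_bullets_per_slide : Int) (max_slides : Int), Dom_chunk_slide_specs slides max_bullets_per_slide max_slides → Spec_chunk_slide_specs slides max_bullets_per_slide max_slides (chunk_slide_specs slides max_bullets_per_slide max_slides)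

-- ===== LEMMAS AND PROOFS =====

-- what A computes for one slide, as a pure expansion (proof-side helper)
def pvExpand (mb : Int) (spec : String × List String) : List (String × List String) :=
  if spec.2 = [] then [(spec.1, [])]
  else
    let step := max 1 mb
    (PySem.List.pyRange 0 (spec.2.length : Int) step).map fun i =>
      ((if i = 0 then spec.1 else spec.1 ++ " (cont.)"),
       PySem.List.slice spec.2 (some i) (some (i + step)))

-- canonical chunking: chunks of size n+1 with a constant title
def pvCChunks (c : String) (n : Nat) : List String → List (String × List String)
  | [] => []
  | b :: bs => (c, (b :: bs).take (n + 1)) :: pvCChunks c n ((b :: bs).drop (n + 1))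
  termination_by bs => bs.length
  decreasing_by simp

-- A's break condition 'len(out) >= ms' is the Nat condition '(max 0 ms).toNat ≤ out.length'
theorem pvCond_iff (ms : Int) (out : List (String × List String)) :
    ((out.length : Int) ≥ ms) ↔ ((max 0 ms).toNat ≤ out.length) := by
  omega

-- the inner break-loop appends the mapped indices, truncated at the cap
theorem pvInnerA_eq (ms : Int) (title : String) (bullets : List String) (step : Int)
    (idxs : List Int) (out : List (String × List String)) :
    pvInnerA ms title bullets step idxs out =
      out ++ (idxs.map fun i =>
          ((if i = 0 then title else title ++ " (cont.)"),
           PySem.List.slice bullets (some i) (some (i + step)))).take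
        ((max 0 ms).toNat - out.length) := by
  induction idxs generalizing out with
  | nil => simp [pvInnerA]
  | cons i rest ih =>
    rw [pvInnerA]
    split
    · rename_i h
      rw [pvCond_iff] at h
      have : (max 0 ms).toNat - out.length = 0 := by omega
      simp [this]
    · rename_i h
      rw [pvCond_iff] at h
      obtain ⟨k, hk⟩ : ∃ k, (max 0 ms).toNat - out.length = k + 1 :=
        ⟨(max 0 ms).toNat - out.length - 1, by omega⟩
      rw [ih]
      have hk' : ∀ (y : String × List String), (max 0 ms).toNat - (out ++ [y]).length = k := by
        intro y; simp; omega
      rw [hk', hk]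
      simp [List.take_succ_cons]

-- the outer break-loop appends the full expansion, truncated at the cap
theorem pvOuterA_eq (ms mb : Int) (slides : List (String × List String))
    (out : List (String × List String)) :
    pvOuterA ms mb slides out =
      out ++ (slides.flatMap (pvExpand mb)).take ((max 0 ms).toNat - out.length) := by
  induction slides generalizing out with
  | nil => simp [pvOuterA]
  | cons hd rest ih =>
    obtain ⟨title, bullets⟩ := hd
    rw [pvOuterA]
    split
    · rename_i h
      rw [pvCond_iff] at h
      have : (max 0 ms).toNat - out.length = 0 := by omega
      simp [this]
    · rename_i h
      rw [pvCond_iff] at h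
      split
      · rename_i hb
        obtain ⟨k, hk⟩ : ∃ k, (max 0 ms).toNat - out.length = k + 1 :=
          ⟨(max 0 ms).toNat - out.length - 1, by omega⟩
        rw [ih]
        have hk' : (max 0 ms).toNat - (out ++ [(title, ([] : List String))]).length = k := by
          simp; omega
        rw [hk']
        simp [pvExpand, hb, hk, List.take_succ_cons]
      · rename_i hb
        have hexp : pvExpand mb (title, bullets) =
            (PySem.List.pyRange 0 (bullets.length : Int) (max 1 mb)).map fun i =>
              ((if i = 0 then title else title ++ " (cont.)"),
               PySem.List.slice bullets (some i) (some (i + max 1 mb))) := by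
          simp [pvExpand, hb]
        have hc : (max 0 ms).toNat -
            (out ++ (pvExpand mb (title, bullets)).take ((max 0 ms).toNat - out.length)).length
            = ((max 0 ms).toNat - out.length) - (pvExpand mb (title, bullets)).length := by
          simp [List.length_take]
          omega
        rw [pvInnerA_eq, ih, ← hexp, hc, List.flatMap_cons, List.take_append,
          List.append_assoc]


theorem pvRange_nonpos (b s : Int) (hs : 0 < s) (hb : b ≤ 0) :
    PySem.List.pyRange 0 b s = [] := by
  rw [PySem.List.pyRange_of_pos _ _ hs]
  simp [show ¬(0:Int) < b from by omega]

theorem pvRange_shift (L s : Int) (hs : 0 < s) (hL : 0 < L) :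
    PySem.List.pyRange 0 L s = 0 :: (PySem.List.pyRange 0 (L - s) s).map (· + s) := by
  rw [PySem.List.pyRange_of_pos _ _ hs, PySem.List.pyRange_of_pos _ _ hs]
  have hq0 : 0 ≤ (L - 1) / s := Int.ediv_nonneg (by omega) (by omega)
  have hdiv : (L - 0 + s - 1) / s = (L - 1) / s + 1 := by
    have h := Int.add_mul_ediv_right (L - 1) 1 (show s ≠ 0 by omega)
    rw [show L - 0 + s - 1 = L - 1 + 1 * s by ring, h]
  by_cases h : 0 < L - s
  · have hdiv2 : (L - s - 0 + s - 1) / s = (L - 1) / s := by ring_nf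
    simp only [hL, if_pos, h, hdiv, hdiv2]
    rw [show ((L-1)/s + 1).toNat = ((L-1)/s).toNat + 1 by omega,
      List.range_succ_eq_map]
    simp only [List.map_cons, List.map_map]
    congr 1
    · simp
    · refine List.map_congr_left fun k _ => ?_
      simp [Function.comp, Nat.succ_eq_add_one]
      ring
  · have hq : (L - 1) / s = 0 := Int.ediv_eq_zero_of_lt (by omega) (by omega)
    have h1 : ((L + s - 1) / s).toNat = 1 := by
      rw [show L + s - 1 = L - 0 + s - 1 by ring]
      omega
    simp [hL, h1]
    omega

theorem pvMap_chunk (s : Int) (hs : 0 < s) (f : Int → String) (bs : List String) (hbs : bs ≠ []) :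
    (PySem.List.pyRange 0 (bs.length : Int) s).map
        (fun i => (f i, PySem.List.slice bs (some i) (some (i + s)))) =
      (f 0, bs.take s.toNat) ::
        (PySem.List.pyRange 0 (((bs.drop s.toNat).length : Nat) : Int) s).map
          (fun i => (f (i + s), PySem.List.slice (bs.drop s.toNat) (some i) (some (i + s)))) := by
  have hL : 0 < (bs.length : Int) := by
    have := List.length_pos_iff.2 hbs
    omega
  rw [pvRange_shift _ _ hs hL]
  simp only [List.map_cons, List.map_map]
  congr 1
  · simp [PySem.List.slice_to bs (le_of_lt hs)]
  · by_cases hls : (bs.length : Int) ≤ s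
    · have h1 : PySem.List.pyRange 0 ((bs.length : Int) - s) s = [] :=
        pvRange_nonpos _ _ hs (by omega)
      have h2 : ((bs.drop s.toNat).length : Int) = 0 := by simp; omega
      rw [h1, h2, pvRange_nonpos _ _ hs (by omega)]
      simp
    · have h2 : ((bs.drop s.toNat).length : Int) = (bs.length : Int) - s := by simp; omega
      rw [h2]
      refine List.map_congr_left fun i hi => ?_
      obtain ⟨hi0, hiL, -⟩ := (PySem.List.mem_pyRange_iff_of_pos hs i).1 hi
      simp only [Function.comp]
      congr 1
      rw [PySem.List.slice_toNat bs (by omega) (by omega),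
          PySem.List.slice_toNat (bs.drop s.toNat) (by omega) (by omega),
          List.drop_drop]
      have e1 : (i + s + s).toNat - (i + s).toNat = s.toNat := by omega
      have e2 : (i + s).toNat - i.toNat = s.toNat := by omega
      have e3 : (i + s).toNat = s.toNat + i.toNat := by omega
      rw [e1, e2, e3]




theorem pvMap_const (s : Int) (hs : 0 < s) (c : String) :
    ∀ (n : Nat) (bs : List String), bs.length ≤ n →
      (PySem.List.pyRange 0 (bs.length : Int) s).map
          (fun i => (c, PySem.List.slice bs (some i) (some (i + s)))) =
        pvCChunks c (s.toNat - 1) bs := by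
  intro n
  induction n with
  | zero =>
    intro bs hle
    have : bs = [] := by cases bs <;> simp_all
    subst this
    rw [show ((([] : List String).length : Nat) : Int) = 0 by simp,
      pvRange_nonpos 0 s hs le_rfl]
    simp [pvCChunks]
  | succ n ih =>
    intro bs hle
    cases bs with
    | nil =>
      rw [show ((([] : List String).length : Nat) : Int) = 0 by simp,
        pvRange_nonpos 0 s hs le_rfl]
      simp [pvCChunks]
    | cons b tl =>
      rw [pvMap_chunk s hs (fun _ => c) (b :: tl) (by simp)]
      have hle2 : (List.drop s.toNat (b :: tl)).length ≤ n := by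
        have h1 : (b :: tl).length = tl.length + 1 := by simp
        simp
        omega
      rw [ih ((b :: tl).drop s.toNat) hle2]
      rw [pvCChunks]
      have hsz : s.toNat - 1 + 1 = s.toNat := by omega
      rw [hsz]

theorem pvExpand_canon' (mb : Int) (title : String) (bullets : List String) (hb : bullets ≠ [])
    (pvExpand : Int → String × List String → List (String × List String))
    (hdef : pvExpand mb (title, bullets) =
      (PySem.List.pyRange 0 (bullets.length : Int) (max 1 mb)).map fun i =>
        ((if i = 0 then title else title ++ " (cont.)"),
         PySem.List.slice bullets (some i) (some (i + max 1 mb)))) :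
    pvExpand mb (title, bullets) =
      (title, bullets.take (max 1 mb).toNat) ::
        pvCChunks (title ++ " (cont.)") ((max 1 mb).toNat - 1) (bullets.drop (max 1 mb).toNat) := by
  have hs : (0:Int) < max 1 mb := by omega
  rw [hdef, pvMap_chunk _ hs _ _ hb]
  have h0 : (if (0:Int) = 0 then title else title ++ " (cont.)") = title := by simp
  rw [h0]
  congr 1
  rw [← pvMap_const _ hs _ (bullets.drop (max 1 mb).toNat).length _ le_rfl]
  refine List.map_congr_left fun i hi => ?_
  obtain ⟨hi0, -, -⟩ := (PySem.List.mem_pyRange_iff_of_pos hs i).1 hi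
  rw [if_neg (by omega)]

theorem pvCChunks_cons (c : String) (n : Nat) (b : String) (bs : List String) :
    pvCChunks c n (b :: bs) =
      (c, (b :: bs).take (n + 1)) :: pvCChunks c n ((b :: bs).drop (n + 1)) := by
  rw [pvCChunks]

theorem pvStream_fill (title : String) (s : Int) (hs : 0 < s) :
    ∀ (bs cur : List String) (specs : List (String × List String)),
      (cur.length : Int) < s →
      pvStream title s bs specs cur =
        if ((cur.length : Int) + (bs.length : Int) < s) then
          (if cur ++ bs = [] then specs else specs ++ [(pvT title specs, cur ++ bs)])
        else
          pvStream title s (bs.drop (s.toNat - cur.length))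
            (specs ++ [(pvT title specs, cur ++ bs.take (s.toNat - cur.length))]) [] := by
  intro bs
  induction bs with
  | nil =>
    intro cur specs h
    rw [if_pos (by simpa using h)]
    simp [pvStream]
  | cons b rest ih =>
    intro cur specs h
    rw [pvStream]
    by_cases heq : ((cur ++ [b]).length : Int) = s
    · rw [if_pos heq]
      have hceq : (cur.length : Int) + 1 = s := by simpa using heq
      rw [if_neg (by simp; omega)]
      have hk : s.toNat - cur.length = 1 := by omega
      rw [hk]
      simp
    · rw [if_neg heq]
      have hlt : ((cur ++ [b]).length : Int) < s := by simp at heq ⊢; omega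
      rw [ih (cur ++ [b]) specs hlt]
      by_cases hcond : ((cur.length : Int) + ((b :: rest).length : Int) < s)
      · rw [if_pos (by simp at hcond ⊢; omega), if_pos hcond]
        simp
      · rw [if_neg (by simp at hcond ⊢; omega), if_neg hcond]
        have hk : s.toNat - cur.length = (s.toNat - (cur ++ [b]).length) + 1 := by
          simp at heq ⊢; omega
        rw [hk]
        simp

theorem pvStream_cont (title : String) (s : Int) (hs : 0 < s) :
    ∀ (n : Nat) (bs : List String), bs.length ≤ n →
      ∀ (specs : List (String × List String)), specs ≠ [] →
      pvStream title s bs specs [] =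
        specs ++ pvCChunks (title ++ " (cont.)") (s.toNat - 1) bs := by
  intro n
  induction n with
  | zero =>
    intro bs hle specs hsp
    have : bs = [] := by cases bs <;> simp_all
    subst this
    simp [pvStream, pvCChunks]
  | succ n ih =>
    intro bs hle specs hsp
    cases bs with
    | nil => simp [pvStream, pvCChunks]
    | cons b tl =>
      rw [pvStream_fill title s hs (b :: tl) [] specs (by simpa using hs)]
      have hT : pvT title specs = title ++ " (cont.)" := by simp [pvT, hsp]
      have hsz : s.toNat - 1 + 1 = s.toNat := by omega
      by_cases hcond : ((([] : List String).length : Int) + ((b :: tl).length : Int) < s)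
      · rw [if_pos hcond]
        rw [pvCChunks_cons, hsz]
        have h1 : (b :: tl).take s.toNat = b :: tl := by
          apply List.take_of_length_le
          simp at hcond ⊢; omega
        have h2 : (b :: tl).drop s.toNat = [] := by
          apply List.drop_eq_nil_of_le
          simp at hcond ⊢; omega
        rw [h1, h2]
        simp [pvCChunks, hT]
      · rw [if_neg hcond]
        have hle2 : ((b :: tl).drop (s.toNat - ([] : List String).length)).length ≤ n := by
          have h1 : (b :: tl).length = tl.length + 1 := by simp
          simp
          omega
        rw [ih _ hle2 _ (by simp)]
        rw [pvCChunks_cons, hsz]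
        simp [hT]

theorem pvStream_canon (title : String) (s : Int) (hs : 0 < s)
    (bullets : List String) (hb : bullets ≠ []) :
    pvStream title s bullets [] [] =
      (title, bullets.take s.toNat) ::
        pvCChunks (title ++ " (cont.)") (s.toNat - 1) (bullets.drop s.toNat) := by
  rw [pvStream_fill title s hs bullets [] [] (by simpa using hs)]
  by_cases hcond : ((([] : List String).length : Int) + (bullets.length : Int) < s)
  · rw [if_pos hcond]
    have h1 : bullets.take s.toNat = bullets := by
      apply List.take_of_length_le
      simp at hcond ⊢; omega
    have h2 : bullets.drop s.toNat = [] := by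
      apply List.drop_eq_nil_of_le
      simp at hcond ⊢; omega
    rw [h1, h2]
    simp [pvT, hb, pvCChunks]
  · rw [if_neg hcond]
    rw [pvStream_cont title s hs (bullets.drop (s.toNat - ([] : List String).length)).length _
      le_rfl _ (by simp)]
    simp [pvT]

theorem pvExpand_canon (mb : Int) (title : String) (bullets : List String) (hb : bullets ≠ []) :
    pvExpand mb (title, bullets) =
      (title, bullets.take (max 1 mb).toNat) ::
        pvCChunks (title ++ " (cont.)") ((max 1 mb).toNat - 1) (bullets.drop (max 1 mb).toNat) := by
  refine pvExpand_canon' mb title bullets hb pvExpand ?_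
  simp [pvExpand, hb]

theorem pvSlideChunks_eq_expand (mb : Int) (title : String) (bullets : List String) :
    pvSlideChunks title bullets (max 1 mb) = pvExpand mb (title, bullets) := by
  by_cases hb : bullets = []
  · subst hb
    simp [pvSlideChunks, pvExpand]
  · have hs : (0:Int) < max 1 mb := by omega
    rw [pvSlideChunks, if_neg hb, pvStream_canon title _ hs bullets hb, pvExpand_canon mb title bullets hb]

theorem pvOuterB_eq (step : Int) (slides : List (String × List String)) (budget : Int)
    (hb : 0 ≤ budget) :
    pvOuterB step slides budget =
      (slides.flatMap (fun sp => pvSlideChunks sp.1 sp.2 step)).take budget.toNat := by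
  induction slides generalizing budget with
  | nil => simp [pvOuterB]
  | cons hd rest ih =>
    obtain ⟨title, bullets⟩ := hd
    rw [pvOuterB]
    by_cases hz : budget = 0
    · rw [if_pos hz, hz]
      simp
    · rw [if_neg hz]
      have hsl : PySem.List.slice (pvSlideChunks title bullets step) none (some budget) =
          (pvSlideChunks title bullets step).take budget.toNat :=
        PySem.List.slice_to _ hb
      simp only [hsl]
      have hlen : ((pvSlideChunks title bullets step).take budget.toNat).length =
          min budget.toNat (pvSlideChunks title bullets step).length := by
        simp
      rw [ih _ (by omega)]
      rw [List.flatMap_cons, List.take_append]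
      simp only []
      congr 2
      omega

-- ===== VERDICT =====
theorem chunk_slide_specs_spec : Claim_equal_chunk_slide_specs := by
  intro slides mb ms _
  unfold Spec_chunk_slide_specs chunk_slide_specs chunk_slide_specs_alt
  rw [pvOuterA_eq, pvOuterB_eq _ _ _ (by omega)]
  have hflat : slides.flatMap (fun sp => pvSlideChunks sp.1 sp.2 (max 1 mb)) =
      slides.flatMap (pvExpand mb) := by
    refine List.flatMap_congr ?_ 
    intro sp _
    rw [pvSlideChunks_eq_expand mb sp.1 sp.2]
  rw [hflat]
  simp
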